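-- pv_equiv track=rewrite | github.com/avlopensource/pygtk | examples/ide/gtkcons.py | remQuotStr
-- ===== SOURCE A (Python) =====
-- def remQuotStr(s):
--     '''Returns s with any quoted strings removed (leaving quote marks)'''
--     r = ''
--     inq = 0
--     qt = ''
--     prev = '_'
--     while len(s):
--         s0, s = s[0], s[1:]
--         if inq and (s0 != qt or prev == '\\'):
--             prev = s0
--             continue
--         prev = s0
--         if s0 in '\'"':
--             if inq:
--                 inq = 0
--             else:
--                 inq = 1
--                 qt = s0
--         r = r + s0
--     return r
-- ===== SOURCE B (Python) =====
-- def remQuotStr(s):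
--     '''Returns s with any quoted strings removed (leaving quote marks)'''
--     out = []
--     i = 0
--     n = len(s)
--     while i < n:
--         c = s[i]
--         out.append(c)
--         i += 1
--         if c in '\'"':
--             j = i
--             while True:
--                 j = s.find(c, j)
--                 if j == -1:
--                     i = n
--                     break
--                 if s[j - 1] == '\\':
--                     j += 1
--                     continue
--                 out.append(c)
--                 i = j + 1
--                 break
--     return ''.join(out)
-- ===== Notes on version B (the rewrite author's own statement) =====
-- stated objective: faster
-- what changed: Replaces A's per-character state machine (inq flag, qt, prev toggled on every char, with s=s[1:] recopying the string each step) with an index-based segment scanner that copies plain text and, at a quote mark, uses str.find to jump to the unescaped closing quote.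
import Mathlib
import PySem

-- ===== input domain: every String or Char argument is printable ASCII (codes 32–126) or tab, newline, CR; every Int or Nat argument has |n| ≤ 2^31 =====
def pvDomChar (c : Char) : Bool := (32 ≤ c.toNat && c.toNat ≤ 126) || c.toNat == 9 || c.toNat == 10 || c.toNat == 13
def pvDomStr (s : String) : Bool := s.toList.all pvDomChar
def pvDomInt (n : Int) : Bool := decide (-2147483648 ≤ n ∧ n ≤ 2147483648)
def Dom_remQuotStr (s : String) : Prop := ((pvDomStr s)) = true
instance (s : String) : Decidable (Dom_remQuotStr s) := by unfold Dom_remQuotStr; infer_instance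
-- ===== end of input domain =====

-- B replaces A's per-character inq/qt/prev toggle with a segment scanner that copies
-- plain text and, at a quote, searches forward for the unescaped closing quote (objective: alternative).

-- ===== PORT A =====
-- A's while loop: state (inq, qt, prev), one character consumed per step, r built left to right.
-- Python's qt starts as '' and is never read while inq = 0; the port uses the dummy '_' for it.
def remQuotStrGo : List Char → Bool → Char → Char → List Char
  | [], _, _, _ => []
  | s0 :: s, inq, qt, prev =>
    if inq = true ∧ (s0 ≠ qt ∨ prev = '\\') then
      remQuotStrGo s inq qt s0
    else if s0 = '\'' ∨ s0 = '"' then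
      (if inq then s0 :: remQuotStrGo s false qt s0
       else s0 :: remQuotStrGo s true s0 s0)
    else
      s0 :: remQuotStrGo s inq qt s0

def remQuotStr (s : String) : String :=
  String.mk (remQuotStrGo s.toList false '_' '_')

-- ===== PORT B =====
-- Source B's inner `while True: j = s.find(c, j) …` over a list: scan for the closing quote c,
-- tracking the previous character (the s[j-1] escape check); returns the suffix after it.
def findClose (c : Char) : Char → List Char → Option (List Char)
  | _, [] => none
  | prev, x :: xs => if x = c ∧ prev ≠ '\\' then some xs else findClose c x xs

theorem findClose_lt (c : Char) :
    ∀ (l : List Char) (prev : Char) (rest : List Char),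
      findClose c prev l = some rest → rest.length < l.length := by
  intro l
  induction l with
  | nil => intro prev rest h; simp [findClose] at h
  | cons x xs ih =>
    intro prev rest h
    by_cases hc : x = c ∧ prev ≠ '\\'
    · simp [findClose, hc] at h
      subst h; simp
    · simp [findClose, hc] at h
      exact Nat.lt_succ_of_lt (ih x rest h)

-- Source B's outer while: copy characters; at a quote, emit it, look for the closing quote,
-- emit it and continue after, or drop the rest of the string if none is found.
def remQuotStrScan : List Char → List Char
  | [] => []
  | x :: xs =>
    if x = '\'' ∨ x = '"' then
      match hf : findClose x x xs with
      | some rest => x :: x :: remQuotStrScan rest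
      | none => [x]
    else
      x :: remQuotStrScan xs
termination_by l => l.length
decreasing_by
  · exact Nat.lt_succ_of_lt (findClose_lt x xs x rest hf)
  · simp

def remQuotStr_alt (s : String) : String :=
  String.mk (remQuotStrScan s.toList)

-- ===== PRECONDITION & SPEC =====
def Spec_remQuotStr (s : String) (out : String) : Prop := out = remQuotStr_alt s
instance (s : String) (out : String) : Decidable (Spec_remQuotStr s out) := by unfold Spec_remQuotStr; infer_instance

-- ===== CLAIM (what is proved, stated in full; the proofs are below) =====
def Claim_equal_remQuotStr : Prop := ∀ (s : String), Dom_remQuotStr s → Spec_remQuotStr s (remQuotStr s)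

-- ===== LEMMAS AND PROOFS =====

-- In-quote: A's flag-toggling loop consumes exactly up to the unescaped closing quote.
theorem go_inq (qt : Char) (hq : qt = '\'' ∨ qt = '"') :
    ∀ (l : List Char) (prev : Char),
      remQuotStrGo l true qt prev =
        (match findClose qt prev l with
         | some rest => qt :: remQuotStrGo rest false qt qt
         | none => []) := by
  intro l
  induction l with
  | nil => intro prev; simp [remQuotStrGo, findClose]
  | cons x xs ih =>
    intro prev
    by_cases hc : x = qt ∧ prev ≠ '\\'
    · obtain ⟨hx, hp⟩ := hc
      subst hx
      simp [remQuotStrGo, findClose, hp, hq]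
    · have hcond : x ≠ qt ∨ prev = '\\' := by tauto
      simp only [findClose, if_neg hc]
      rw [show remQuotStrGo (x :: xs) true qt prev = remQuotStrGo xs true qt x from by
        simp [remQuotStrGo, hcond]]
      exact ih x

-- Out-of-quote: A's loop equals B's segment scanner (qt, prev are dead state here).
theorem go_eq_scan : ∀ (n : Nat) (l : List Char), l.length ≤ n →
    ∀ (qt prev : Char), remQuotStrGo l false qt prev = remQuotStrScan l := by
  intro n
  induction n with
  | zero =>
    intro l hl qt prev
    have : l = [] := List.eq_nil_of_length_eq_zero (Nat.le_zero.mp hl)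
    subst this; simp [remQuotStrGo, remQuotStrScan]
  | succ n ih =>
    intro l hl qt prev
    match l with
    | [] => simp [remQuotStrGo, remQuotStrScan]
    | x :: xs =>
      by_cases hq : x = '\'' ∨ x = '"'
      · have h1 : remQuotStrGo (x :: xs) false qt prev = x :: remQuotStrGo xs true x x := by
          simp [remQuotStrGo, hq]
        rw [h1, go_inq x hq xs x]
        rw [remQuotStrScan]
        simp only [if_pos hq]
        cases hf : findClose x x xs with
        | some rest =>
          have hlt : rest.length < xs.length := findClose_lt x xs x rest hf
          have : rest.length ≤ n := by
            have : xs.length ≤ n := Nat.le_of_succ_le_succ (by simpa using hl)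
            omega
          simp [ih rest this x x]
        | none => simp
      · have h1 : remQuotStrGo (x :: xs) false qt prev = x :: remQuotStrGo xs false qt x := by
          simp [remQuotStrGo, hq]
        rw [h1, remQuotStrScan]
        simp only [if_neg hq]
        have : xs.length ≤ n := Nat.le_of_succ_le_succ (by simpa using hl)
        rw [ih xs this qt x]

-- ===== VERDICT (by name: the statement is the Claim_ definition above) =====
theorem remQuotStr_spec : Claim_equal_remQuotStr := by
  intro s _
  unfold Spec_remQuotStr remQuotStr remQuotStr_alt
  rw [go_eq_scan s.toList.length s.toList (le_refl _)]
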